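-- pv_equiv track=rewrite | github.com/FvipF/untitled1 | lagranga.py | lagr
-- ===== SOURCE A (Python) =====
-- def lagr(n):
--     t = []
--     for a in range(n, -1, -1):
--         for b in range(n, -1, -1):
--             for c in range(n, -1, -1):
--                 for d in range(n, -1, -1):
--                     if a ** 2 + b ** 2 + c ** 2 + d ** 2 == n:
--                         t = t + [a, b, c, d]
--                         s = [x for x in t if x != 0]
--                         return s
-- ===== SOURCE B (Python) =====
-- def lagr(n):
--     # candidate values: all i with i*i <= n (i.e. 0..isqrt(n)); A scans 0..n at every level
--     roots = [i for i in range(n + 1) if i * i <= n]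
--     rev = roots[::-1]
--     for a in rev:
--         ra = n - a * a
--         for b in rev:
--             if b * b <= ra:
--                 rb = ra - b * b
--                 for c in rev:
--                     if c * c <= rb:
--                         m = rb - c * c
--                         for d in rev:
--                             if d * d == m:
--                                 return [x for x in (a, b, c, d) if x != 0]
-- ===== Notes on version B (the rewrite author's own statement) =====
-- stated objective: faster
-- what changed: B precomputes the list of candidates i with i*i <= n (0..isqrt(n)) once and runs all four nested descending scans over that list with early negative-remainder pruning, instead of A's four scans over the full range n..0.
import Mathlib
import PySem

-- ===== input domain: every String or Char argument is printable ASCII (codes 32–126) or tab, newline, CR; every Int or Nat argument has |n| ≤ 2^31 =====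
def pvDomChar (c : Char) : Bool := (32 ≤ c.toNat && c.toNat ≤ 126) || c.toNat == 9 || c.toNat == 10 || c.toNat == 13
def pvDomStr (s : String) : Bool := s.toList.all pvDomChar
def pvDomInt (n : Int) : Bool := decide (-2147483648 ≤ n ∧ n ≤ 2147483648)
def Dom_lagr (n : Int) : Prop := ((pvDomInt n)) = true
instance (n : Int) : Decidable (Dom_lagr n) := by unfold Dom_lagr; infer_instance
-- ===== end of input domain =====

-- B bounds all four nested scans by isqrt(n) instead of n (asymptotically faster search);
-- equivalence is about the return value on n ≥ 0 (A returns None, not a list, for n < 0).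

-- ===== PORT A =====
def lagr (n : Int) : List Int :=
  ((PySem.List.pyRange n (-1) (-1)).findSome? (fun a =>
    (PySem.List.pyRange n (-1) (-1)).findSome? (fun b =>
      (PySem.List.pyRange n (-1) (-1)).findSome? (fun c =>
        (PySem.List.pyRange n (-1) (-1)).findSome? (fun d =>
          if a ^ 2 + b ^ 2 + c ^ 2 + d ^ 2 = n then
            some ((([] : List Int) ++ [a, b, c, d]).filter (fun x => x != 0))
          else none))))).getD []

-- ===== PORT B =====
def lagr_alt (n : Int) : List Int :=
  let roots := (PySem.List.pyRange 0 (n + 1) 1).filter (fun i => i * i ≤ n)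
  let rev := roots.reverse     -- roots[::-1] (PySem.List.slice?_none_none_neg_one)
  (rev.findSome? (fun a =>
    let ra := n - a * a
    rev.findSome? (fun b =>
      if b * b ≤ ra then
        let rb := ra - b * b
        rev.findSome? (fun c =>
          if c * c ≤ rb then
            let m := rb - c * c
            rev.findSome? (fun d =>
              if d * d = m then some ([a, b, c, d].filter (fun x => x != 0)) else none)
          else none)
      else none))).getD []

-- ===== PRECONDITION & SPEC =====
-- Pre_ excludes n < 0, where A falls off its loops and returns None (not a list).
def Pre_lagr (n : Int) : Prop := 0 ≤ n
instance (n : Int) : Decidable (Pre_lagr n) := by unfold Pre_lagr; infer_instance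
def pvWitness_lagr : Int := 5

def Spec_lagr (n : Int) (out : List Int) : Prop := out = lagr_alt n
instance (n : Int) (out : List Int) : Decidable (Spec_lagr n out) := by unfold Spec_lagr; infer_instance

-- ===== CLAIM (what is proved, stated in full; the proofs are below) =====
def Claim_equal_lagr : Prop := ∀ (n : Int), Dom_lagr n → Pre_lagr n → Spec_lagr n (lagr n)

-- ===== LEMMAS AND PROOFS =====

-- the integer square root of n (n ≥ 0): greatest K with K*K ≤ n
def pvK (n : Int) : Int := (Nat.sqrt n.toNat : Int)

lemma pvK_nonneg (n : Int) : 0 ≤ pvK n := Int.natCast_nonneg _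

lemma pvK_sq_le {n : Int} (hn : 0 ≤ n) : pvK n * pvK n ≤ n := by
  have h := Nat.sqrt_le' n.toNat
  have : ((Nat.sqrt n.toNat * Nat.sqrt n.toNat : Nat) : Int) ≤ (n.toNat : Int) := by
    exact_mod_cast (by simpa [pow_two] using h)
  simpa [pvK, Int.toNat_of_nonneg hn] using this

lemma pvK_lt_succ_sq {n : Int} (hn : 0 ≤ n) : n < (pvK n + 1) * (pvK n + 1) := by
  have h := Nat.lt_succ_sqrt' n.toNat
  have : (n.toNat : Int) < ((Nat.sqrt n.toNat + 1) * (Nat.sqrt n.toNat + 1) : Nat) := by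
    exact_mod_cast (by simpa [pow_two, Nat.succ_eq_add_one] using h)
  have h2 : ((Nat.sqrt n.toNat + 1) * (Nat.sqrt n.toNat + 1) : Nat) = ((Nat.sqrt n.toNat : Int) + 1) * ((Nat.sqrt n.toNat : Int) + 1) := by push_cast; ring
  rw [h2] at this
  simpa [pvK, Int.toNat_of_nonneg hn] using this

lemma pvK_le {n : Int} (hn : 0 ≤ n) : pvK n ≤ n := by
  have h1 := pvK_sq_le hn
  have h0 := pvK_nonneg n
  nlinarith

-- a value above the square-root bound makes the square exceed n
lemma pv_sq_big {n x : Int} (hn : 0 ≤ n) (hx : pvK n < x) : n < x * x := by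
  have h2 := pvK_lt_succ_sq hn
  have h0 := pvK_nonneg n
  nlinarith

-- B's candidate list is exactly 0..isqrt(n)
lemma pv_roots_eq {n : Int} (hn : 0 ≤ n) :
    (PySem.List.pyRange 0 (n + 1) 1).filter (fun i => i * i ≤ n) =
      PySem.List.pyRange 0 (pvK n + 1) 1 := by
  have hK := pvK_le hn
  rw [PySem.List.pyRange_one_append 0 (pvK n + 1) (n + 1)
      (by have := pvK_nonneg n; omega) (by omega), List.filter_append]
  have h1 : (PySem.List.pyRange 0 (pvK n + 1) 1).filter (fun i => i * i ≤ n) =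
      PySem.List.pyRange 0 (pvK n + 1) 1 := by
    rw [List.filter_eq_self]
    intro a ha
    rw [PySem.List.mem_pyRange_one] at ha
    have hs := pvK_sq_le hn
    simp only [decide_eq_true_eq]
    nlinarith [ha.1, ha.2]
  have h2 : (PySem.List.pyRange (pvK n + 1) (n + 1) 1).filter (fun i => i * i ≤ n) = [] := by
    rw [List.filter_eq_nil_iff]
    intro a ha
    rw [PySem.List.mem_pyRange_one] at ha
    have := pv_sq_big hn (show pvK n < a by omega)
    simp only [decide_eq_true_eq]
    omega
  rw [h1, h2, List.append_nil]

lemma pv_rev_eq {n : Int} (hn : 0 ≤ n) :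
    ((PySem.List.pyRange 0 (n + 1) 1).filter (fun i => i * i ≤ n)).reverse =
      PySem.List.pyRange (pvK n) (-1) (-1) := by
  rw [pv_roots_eq hn, PySem.List.pyRange_neg_one_eq_reverse]
  norm_num

-- pointwise-equal bodies give equal searches
lemma pv_findSome?_congr {α β : Type} (l : List α) (f g : α → Option β)
    (h : ∀ x ∈ l, f x = g x) : l.findSome? f = l.findSome? g := by
  induction l with
  | nil => rfl
  | cons a l ih =>
    rw [List.findSome?_cons, List.findSome?_cons, h a (by simp)]
    cases g a with
    | some b => rfl
    | none => exact ih (fun x hx => h x (by simp [hx]))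

-- a descending scan from n equals the scan from K ≤ n when the body vanishes above K
lemma pv_restrict {β : Type} (f : Int → Option β) :
    ∀ (m : Nat) (n K : Int), n = K + m →
    (∀ x, K < x → x ≤ n → f x = none) →
    (PySem.List.pyRange n (-1) (-1)).findSome? f =
      (PySem.List.pyRange K (-1) (-1)).findSome? f := by
  intro m
  induction m with
  | zero => intro n K hnk _; simp [hnk]
  | succ m ih =>
    intro n K hnk h
    have hKn : K < n := by omega
    by_cases hK : -1 < n
    · rw [PySem.List.pyRange_neg_one_cons hK, List.findSome?_cons,
        h n hKn le_rfl]
      exact ih (n - 1) K (by omega) (fun x hx1 hx2 => h x hx1 (by omega))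
    · rw [PySem.List.pyRange_neg_one_eq_nil (by omega),
        PySem.List.pyRange_neg_one_eq_nil (by omega)]

lemma pv_main {n : Int} (hn : 0 ≤ n) : lagr n = lagr_alt n := by
  unfold lagr lagr_alt
  simp only []
  rw [pv_rev_eq hn]
  have hK0 := pvK_nonneg n
  have hKn := pvK_le hn
  congr 1
  -- level a
  rw [pv_restrict _ (n - pvK n).toNat n (pvK n) (by omega)
    (by
      intro x hx1 hx2
      rw [List.findSome?_eq_none_iff]
      intro b _
      rw [List.findSome?_eq_none_iff]
      intro c _
      rw [List.findSome?_eq_none_iff]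
      intro d _
      rw [if_neg]
      have := pv_sq_big hn hx1
      nlinarith [mul_self_nonneg b, mul_self_nonneg c, mul_self_nonneg d])]
  apply pv_findSome?_congr
  intro a ha
  rw [PySem.List.mem_pyRange_neg_one] at ha
  -- level b
  rw [pv_restrict _ (n - pvK n).toNat n (pvK n) (by omega)
    (by
      intro x hx1 hx2
      rw [List.findSome?_eq_none_iff]
      intro c _
      rw [List.findSome?_eq_none_iff]
      intro d _
      rw [if_neg]
      have := pv_sq_big hn hx1
      nlinarith [mul_self_nonneg a, mul_self_nonneg c, mul_self_nonneg d])]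
  apply pv_findSome?_congr
  intro b hb
  rw [PySem.List.mem_pyRange_neg_one] at hb
  by_cases hbg : b * b ≤ n - a * a
  · rw [if_pos hbg]
    -- level c
    rw [pv_restrict _ (n - pvK n).toNat n (pvK n) (by omega)
      (by
        intro x hx1 hx2
        rw [List.findSome?_eq_none_iff]
        intro d _
        rw [if_neg]
        have := pv_sq_big hn hx1
        nlinarith [mul_self_nonneg a, mul_self_nonneg b, mul_self_nonneg d])]
    apply pv_findSome?_congr
    intro c hc
    rw [PySem.List.mem_pyRange_neg_one] at hc
    by_cases hcg : c * c ≤ n - a * a - b * b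
    · rw [if_pos hcg]
      -- level d
      rw [pv_restrict _ (n - pvK n).toNat n (pvK n) (by omega)
        (by
          intro x hx1 hx2
          rw [if_neg]
          have := pv_sq_big hn hx1
          nlinarith [mul_self_nonneg a, mul_self_nonneg b, mul_self_nonneg c])]
      apply pv_findSome?_congr
      intro d _
      rw [if_congr (show a ^ 2 + b ^ 2 + c ^ 2 + d ^ 2 = n ↔ d * d = n - a * a - b * b - c * c by
        constructor <;> intro h <;> nlinarith [h]) rfl rfl]
      simp
    · rw [if_neg hcg, List.findSome?_eq_none_iff]
      intro d _
      rw [if_neg]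
      nlinarith [mul_self_nonneg d]
  · rw [if_neg hbg, List.findSome?_eq_none_iff]
    intro c _
    rw [List.findSome?_eq_none_iff]
    intro d _
    rw [if_neg]
    nlinarith [mul_self_nonneg c, mul_self_nonneg d]

-- ===== VERDICT (by name: the statement is the Claim_ definition above) =====
theorem lagr_spec : Claim_equal_lagr := by
  intro n _ hn
  exact pv_main hn
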